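-- pv_equiv track=rewrite | github.com/yudhiesh/Dynamic-Programming | all_construct.py | all_construct_recursive
-- ===== SOURCE A (Python) =====
-- from typing import Dict, List
--
-- def all_construct_recursive(target: str, word_bank: List[str]) -> List[List[str]]:
--     if target == "":
--         return [[]]
--     result = []
--     for word in word_bank:
--         if target.startswith(word):
--             suffix = target[len(word) :]
--             suffix_ways = all_construct_recursive(suffix, word_bank)
--             target_ways = [way + [word] for way in suffix_ways]
--             if target_ways:
--                 result.extend(target_ways)
--     return result
-- ===== SOURCE B (Python) =====
-- def all_construct_recursive(target, word_bank):
--     # Bottom-up DP over suffix start positions: table[i] = all ways to build target[i:].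
--     n = len(target)
--     table = [None] * (n + 1)
--     table[n] = [[]]
--     for i in range(n - 1, -1, -1):
--         ways = []
--         for word in word_bank:
--             if word and target.startswith(word, i):
--                 for way in table[i + len(word)]:
--                     ways.append(way + [word])
--         table[i] = ways
--     return table[0]
-- ===== Notes on version B (the rewrite author's own statement) =====
-- stated objective: alternative
-- what changed: Replaces the naive top-down recursion over suffixes with a bottom-up dynamic-programming table indexed by suffix start position, so each suffix's way-list is computed once instead of being recomputed on every recursive visit.
import Mathlib
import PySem

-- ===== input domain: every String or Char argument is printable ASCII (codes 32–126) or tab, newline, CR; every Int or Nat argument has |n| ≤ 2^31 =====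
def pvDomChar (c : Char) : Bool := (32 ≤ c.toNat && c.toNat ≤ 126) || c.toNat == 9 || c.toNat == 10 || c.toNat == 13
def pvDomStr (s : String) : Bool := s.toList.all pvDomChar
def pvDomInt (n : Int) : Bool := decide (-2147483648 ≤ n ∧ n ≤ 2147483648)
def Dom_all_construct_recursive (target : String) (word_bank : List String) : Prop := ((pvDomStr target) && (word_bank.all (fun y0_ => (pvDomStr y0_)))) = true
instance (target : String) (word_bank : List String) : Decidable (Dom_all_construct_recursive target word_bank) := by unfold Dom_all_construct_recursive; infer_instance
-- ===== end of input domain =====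

-- B replaces A's naive recursion by a bottom-up DP table over suffix start positions; A raises
-- RecursionError when "" is in the bank and the target is nonempty — those inputs are outside Pre_.

-- ===== PORT A =====
-- A's unbounded recursion is ported with a fuel of target-length + 1, which is always sufficient on Pre_
-- (every recursive call strictly shortens the target when no bank word is empty).
def pvARec (wb : List String) : Nat → List Char → List (List String)
  | 0, _ => []
  | f + 1, t =>
    if t = [] then [[]]
    else
      wb.foldl (fun result word =>
        if t.take word.toList.length = word.toList then
          let suffix := t.drop word.toList.length
          let target_ways := (pvARec wb f suffix).map (fun way => way ++ [word])
          if target_ways ≠ [] then result ++ target_ways else result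
        else result) []

def all_construct_recursive (target : String) (word_bank : List String) : List (List String) :=
  pvARec word_bank (target.toList.length + 1) target.toList

-- ===== PORT B =====
-- table is kept as a list whose head is table[i+1] (the loop runs i from n-1 down to 0),
-- so Python's table[i + len(word)] is rest[len(word) - 1].
def pvBWays (t : List Char) (wb : List String) (i : Nat) (rest : List (List (List String))) : List (List String) :=
  wb.foldl (fun ways word =>
    if word.toList ≠ [] ∧ (t.drop i).take word.toList.length = word.toList then
      ways ++ (rest.getD (word.toList.length - 1) []).map (fun way => way ++ [word])
    else ways) []

def pvBBuild (t : List Char) (wb : List String) : Nat → List (List (List String))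
  | 0 => [[[]]]
  | k + 1 => pvBWays t wb (t.length - (k + 1)) (pvBBuild t wb k) :: pvBBuild t wb k

def all_construct_recursive_alt (target : String) (word_bank : List String) : List (List String) :=
  (pvBBuild target.toList word_bank target.toList.length).headD []

-- ===== PRECONDITION & SPEC =====
-- Pre_ excludes the inputs on which A raises RecursionError: a nonempty target with "" in the word bank.
def Pre_all_construct_recursive (target : String) (word_bank : List String) : Prop :=
  target = "" ∨ "" ∉ word_bank
instance (target : String) (word_bank : List String) : Decidable (Pre_all_construct_recursive target word_bank) := by unfold Pre_all_construct_recursive; infer_instance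

def pvWitness_all_construct_recursive : String × List String := ("abc", ["a", "bc", "ab", "c"])

def Spec_all_construct_recursive (target : String) (word_bank : List String) (out : List (List String)) : Prop := out = all_construct_recursive_alt target word_bank
instance (target : String) (word_bank : List String) (out : List (List String)) : Decidable (Spec_all_construct_recursive target word_bank out) := by unfold Spec_all_construct_recursive; infer_instance

-- ===== CLAIM (what is proved, stated in full; the proofs are below) =====
def Claim_equal_all_construct_recursive : Prop := ∀ (target : String) (word_bank : List String), Dom_all_construct_recursive target word_bank → Pre_all_construct_recursive target word_bank → Spec_all_construct_recursive target word_bank (all_construct_recursive target word_bank)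


-- ===== LEMMAS AND PROOFS =====

lemma pv_take_len {t : List Char} {w : String} (hw : w.toList ≠ []) (h : t.take w.length = w.toList) :
    1 ≤ w.length ∧ w.length ≤ t.length := by
  have hl := congrArg List.length h
  simp [List.length_take] at hl
  have hw1 : 1 ≤ w.toList.length := by
    cases hx : w.toList with
    | nil => exact absurd hx hw
    | cons a l => simp
  simp at hw1
  omega

lemma pvARec_fuel (wb : List String) (hwb : ∀ w ∈ wb, w.toList ≠ []) :
    ∀ f1 f2 t, t.length < f1 → t.length < f2 → pvARec wb f1 t = pvARec wb f2 t := by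
  intro f1
  induction f1 with
  | zero => intro f2 t h1; omega
  | succ a ih =>
    intro f2 t h1 h2
    cases f2 with
    | zero => omega
    | succ b =>
      simp only [pvARec]
      by_cases ht : t = []
      · simp [ht]
      · simp only [ht, if_false]
        apply PySem.List.foldl_congr_mem
        intro acc word hmem
        by_cases hc : t.take word.length = word.toList
        · have hb := pv_take_len (hwb word hmem) hc
          have hrec : pvARec wb a (t.drop word.length) = pvARec wb b (t.drop word.length) := by
            apply ih <;> · simp [List.length_drop]; omega
          simp only [String.length_toList, hrec]
        · simp only [String.length_toList, hc, if_neg, not_false_iff]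

lemma pv_getD_map_range {α : Type} (f : Nat → α) (d : α) (m j : Nat) (h : j < m) :
    ((List.range m).map f).getD j d = f j := by
  rw [List.getD_eq_getElem _ _ (by simpa using h)]
  simp

lemma pvBWays_eq (t : List Char) (wb : List String) (hwb : ∀ w ∈ wb, w.toList ≠ [])
    (k : Nat) (hk : k + 1 ≤ t.length) :
    pvBWays t wb (t.length - (k + 1))
      ((List.range (k + 1)).map (fun j => pvARec wb (t.length + 1) (t.drop (t.length - k + j))))
    = pvARec wb (t.length + 1) (t.drop (t.length - (k + 1))) := by
  have hne : t.drop (t.length - (k + 1)) ≠ [] := by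
    intro h
    have := congrArg List.length h
    simp [List.length_drop] at this
    omega
  conv_rhs => rw [pvARec]
  rw [if_neg hne]
  unfold pvBWays
  apply PySem.List.foldl_congr_mem
  intro acc word hmem
  have hwne := hwb word hmem
  by_cases hc : (t.drop (t.length - (k + 1))).take word.length = word.toList
  · have hb := pv_take_len hwne hc
    rw [List.length_drop] at hb
    have hlen : word.length ≤ k + 1 := by omega
    have hidx : word.length - 1 < k + 1 := by omega
    have hwne' : word ≠ "" := fun h => hwne (by simp [h])
    have harg : t.length - k + (word.length - 1) = t.length - (k + 1) + word.length := by omega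
    have hdd : (t.drop (t.length - (k + 1))).drop word.length = t.drop (t.length - k + (word.length - 1)) := by
      rw [List.drop_drop, harg]
    have hfuel : pvARec wb t.length (t.drop (t.length - k + (word.length - 1)))
        = pvARec wb (t.length + 1) (t.drop (t.length - k + (word.length - 1))) := by
      apply pvARec_fuel wb hwb <;> · rw [List.length_drop]; omega
    simp only [String.length_toList, hc, if_pos, and_true,
      pv_getD_map_range _ _ _ _ hidx, hdd, hfuel]
    by_cases hz : pvARec wb (t.length + 1) (t.drop (t.length - k + (word.length - 1))) = [] <;>
      simp [hz, hwne']
  · simp only [String.length_toList, hc, and_false, if_neg, not_false_iff]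

lemma pvBBuild_eq (t : List Char) (wb : List String) (hwb : ∀ w ∈ wb, w.toList ≠ []) :
    ∀ k, k ≤ t.length →
      pvBBuild t wb k =
        (List.range (k + 1)).map (fun j => pvARec wb (t.length + 1) (t.drop (t.length - k + j))) := by
  intro k
  induction k with
  | zero =>
    intro _
    simp [pvBBuild, List.range_one, pvARec]
  | succ k ih =>
    intro hk
    have ihk := ih (by omega)
    have htail : (List.range (k + 1)).map
        ((fun j => pvARec wb (t.length + 1) (t.drop (t.length - (k + 1) + j))) ∘ Nat.succ)
        = (List.range (k + 1)).map (fun j => pvARec wb (t.length + 1) (t.drop (t.length - k + j))) := by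
      apply List.map_congr_left
      intro j _
      have hj : t.length - (k + 1) + Nat.succ j = t.length - k + j := by omega
      simp [Function.comp, hj]
    have hhead : t.length - (k + 1) + 0 = t.length - (k + 1) := by omega
    rw [List.range_succ_eq_map, List.map_cons, List.map_map, htail, hhead]
    show pvBBuild t wb (k + 1) = _
    rw [pvBBuild, ihk, pvBWays_eq t wb hwb k hk]

theorem pv_main (target : String) (wb : List String) (hwb : ∀ w ∈ wb, w.toList ≠ []) :
    pvARec wb (target.toList.length + 1) target.toList
      = (pvBBuild target.toList wb target.toList.length).headD [] := by
  rw [pvBBuild_eq target.toList wb hwb target.toList.length le_rfl]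
  rw [List.range_succ_eq_map, List.map_cons]
  simp

theorem all_construct_recursive_spec : Claim_equal_all_construct_recursive := by
  intro target wb _ hpre
  unfold Spec_all_construct_recursive all_construct_recursive all_construct_recursive_alt
  rcases hpre with h | h
  · subst h
    simp [pvARec, pvBBuild]
  · apply pv_main
    intro w hw heq
    apply h
    have : w = "" := by simpa using heq
    exact this ▸ hw
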